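-- pv_equiv track=rewrite | github.com/yurad12/coding-test | Python/BOJ/Gold/치즈.py | calc
-- ===== SOURCE A (Python) =====
-- INF = int(1e9)
--
-- def calc(costs):
--     # 0: 이전x현재x 1: 이전o현재x, 2:이전x현재o 3:이전o현재o
--     dp = [0, INF, INF, costs[0]]
--     # 0:현재x->이전o, 1:현재o->이전x/o, 2:현재x->이전o, 3:현재o->이전x/o
--     for cost in costs[1:]:
--         new_dp = [INF] * 4
--         new_dp[0] = dp[1]
--         new_dp[1] = min(dp[0], dp[1]) + cost
--         new_dp[2] = dp[3]
--         new_dp[3] = min(dp[2], dp[3]) + cost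
--         dp = new_dp
--     return min(dp[1:])
-- ===== SOURCE B (Python) =====
-- # Two independent 2-scalar chains (first cheese skipped / eaten) instead of one lockstep 4-state DP.
-- INF = int(1e9)
--
-- def _chain(pp, p, tail):
--     # g_i = costs[i] + min(g_{i-1}, g_{i-2}); returns the last two values.
--     for c in tail:
--         pp, p = p, min(pp, p) + c
--     return pp, p
--
-- def calc(costs):
--     tail = costs[1:]
--     _, a = _chain(0, INF, tail)            # chain A: index 0 not eaten
--     b_prev, b = _chain(INF, costs[0], tail)  # chain B: index 0 eaten
--     return min(min(a, b_prev), b)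
-- ===== Notes on version B (the rewrite author's own statement) =====
-- stated objective: simpler
-- what changed: The lockstep 4-state DP is split into two independent 2-scalar chains (index 0 skipped / eaten), each the rolling recurrence g_i = costs[i] + min(g_{i-1}, g_{i-2}), combined at the end.
import Mathlib
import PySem

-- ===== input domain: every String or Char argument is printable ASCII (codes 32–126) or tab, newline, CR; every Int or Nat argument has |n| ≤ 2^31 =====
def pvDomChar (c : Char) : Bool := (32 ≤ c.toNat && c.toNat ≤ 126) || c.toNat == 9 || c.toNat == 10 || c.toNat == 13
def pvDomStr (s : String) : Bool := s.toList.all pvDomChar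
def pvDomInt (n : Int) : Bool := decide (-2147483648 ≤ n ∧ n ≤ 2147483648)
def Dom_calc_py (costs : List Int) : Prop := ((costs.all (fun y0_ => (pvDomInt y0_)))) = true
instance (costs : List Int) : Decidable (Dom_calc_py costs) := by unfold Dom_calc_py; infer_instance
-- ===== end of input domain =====

-- B splits A's lockstep 4-state DP into two independent 2-scalar rolling chains; return value only.


def pvINF : Int := 1000000000

-- ===== PORT A =====
-- dp = (dp0, dp1, dp2, dp3); for cost in costs[1:]: the four updates; return min(dp[1:])
def calc_py (costs : List Int) : Int :=
  let c0 := (PySem.List.pyGet? costs 0).getD 0   -- A raises IndexError on []; excluded by Pre_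
  let dp : Int × Int × Int × Int := (0, pvINF, pvINF, c0)
  let dp := (PySem.List.slice costs (some 1) none).foldl
    (fun (dp : Int × Int × Int × Int) cost =>
      (dp.2.1, min dp.1 dp.2.1 + cost, dp.2.2.2, min dp.2.2.1 dp.2.2.2 + cost)) dp
  min (min dp.2.1 dp.2.2.1) dp.2.2.2

-- ===== PORT B =====
def chainB (pp p : Int) (tail : List Int) : Int × Int :=
  tail.foldl (fun (s : Int × Int) c => (s.2, min s.1 s.2 + c)) (pp, p)

def calc_py_alt (costs : List Int) : Int :=
  let tail := PySem.List.slice costs (some 1) none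
  let a := (chainB 0 pvINF tail).2
  let b := chainB pvINF ((PySem.List.pyGet? costs 0).getD 0) tail
  min (min a b.1) b.2

-- ===== PRECONDITION & SPEC =====
-- A raises IndexError (costs[0]) on the empty list; B raises there too.
def Pre_calc_py (costs : List Int) : Prop := costs ≠ []
instance (costs : List Int) : Decidable (Pre_calc_py costs) := by unfold Pre_calc_py; infer_instance
def pvWitness_calc_py : List Int := ([3, 1, 2])

def Spec_calc_py (costs : List Int) (out : Int) : Prop := out = calc_py_alt costs
instance (costs : List Int) (out : Int) : Decidable (Spec_calc_py costs out) := by unfold Spec_calc_py; infer_instance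

-- ===== CLAIM (what is proved, stated in full; the proofs are below) =====
def Claim_equal_calc_py : Prop := ∀ (costs : List Int), Dom_calc_py costs → Pre_calc_py costs → Spec_calc_py costs (calc_py costs)

-- ===== LEMMAS AND PROOFS =====
-- A's 4-state fold is the pair of B's two independent 2-state folds.
lemma fold4_split (tail : List Int) : ∀ (d0 d1 d2 d3 : Int),
    tail.foldl (fun (dp : Int × Int × Int × Int) cost =>
      (dp.2.1, min dp.1 dp.2.1 + cost, dp.2.2.2, min dp.2.2.1 dp.2.2.2 + cost)) (d0, d1, d2, d3)
    = ((chainB d0 d1 tail).1, (chainB d0 d1 tail).2, (chainB d2 d3 tail).1, (chainB d2 d3 tail).2) := by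
  induction tail with
  | nil => intro d0 d1 d2 d3; simp [chainB]
  | cons c cs ih => intro d0 d1 d2 d3; simp only [List.foldl_cons, chainB, ih]

-- ===== VERDICT (by name: the statement is the Claim_ definition above) =====
theorem calc_py_spec : Claim_equal_calc_py := by
  intro costs _ hpre
  unfold Spec_calc_py calc_py calc_py_alt
  simp only [fold4_split]
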